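-- pv_equiv track=rewrite | github.com/coachpo/clay | app/api/endpoints.py | _resolve_fallback_version
-- ===== SOURCE A (Python) =====
-- from typing import Any, Dict, List, Optional
--
-- def _resolve_fallback_version(
--     requested_version: str,
--     supported_versions: List[str],
-- ) -> Optional[str]:
--     lower_or_equal = [version for version in supported_versions if version <= requested_version]
--     if lower_or_equal:
--         return max(lower_or_equal)
--     return min(supported_versions) if supported_versions else None
-- ===== SOURCE B (Python) =====
-- from typing import List, Optional
--
--
-- def _resolve_fallback_version(
--     requested_version: str,
--     supported_versions: List[str],
-- ) -> Optional[str]: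
--     best_le: Optional[str] = None
--     min_all: Optional[str] = None
--     for version in supported_versions:
--         if min_all is None or version < min_all:
--             min_all = version
--         if version <= requested_version:
--             if best_le is None or best_le < version:
--                 best_le = version
--     return best_le if best_le is not None else min_all
-- ===== Notes on version B (the rewrite author's own statement) =====
-- stated objective: simpler
-- what changed: Replaced the filtered-list comprehension plus max()/min() calls with a single explicit pass keeping two accumulators (largest version <= requested, and overall minimum), returning the first if set else the second.
import Mathlib
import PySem

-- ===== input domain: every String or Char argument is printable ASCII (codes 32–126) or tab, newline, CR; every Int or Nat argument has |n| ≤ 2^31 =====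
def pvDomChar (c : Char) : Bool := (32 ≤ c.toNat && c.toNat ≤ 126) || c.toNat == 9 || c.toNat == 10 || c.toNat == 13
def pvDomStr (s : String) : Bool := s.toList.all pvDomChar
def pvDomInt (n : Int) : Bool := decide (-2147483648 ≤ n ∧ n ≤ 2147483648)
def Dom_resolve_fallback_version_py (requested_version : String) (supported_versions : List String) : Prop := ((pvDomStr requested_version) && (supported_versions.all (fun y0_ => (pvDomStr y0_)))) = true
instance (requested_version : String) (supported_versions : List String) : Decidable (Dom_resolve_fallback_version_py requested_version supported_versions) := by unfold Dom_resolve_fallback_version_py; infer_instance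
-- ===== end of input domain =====

-- B replaces the comprehension + max/min with one pass maintaining two accumulators (simpler; return-value equivalence).
-- ===== PORT A =====
def resolve_fallback_version_py (requested_version : String) (supported_versions : List String) : Option String :=
  let lower_or_equal := supported_versions.filter (fun version => decide (version ≤ requested_version))
  if lower_or_equal ≠ [] then
    PySem.List.max? lower_or_equal (fun y => y)
  else if supported_versions ≠ [] then
    PySem.List.min? supported_versions (fun y => y)
  else none

-- ===== PORT B =====
def pvStep (requested_version : String) (acc : Option String × Option String) (version : String) : Option String × Option String :=
  let min_all :=
    match acc.2 with
    | none => some version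
    | some m => if version < m then some version else some m
  let best_le :=
    if version ≤ requested_version then
      match acc.1 with
      | none => some version
      | some b => if b < version then some version else some b
    else acc.1
  (best_le, min_all)

def resolve_fallback_version_py_alt (requested_version : String) (supported_versions : List String) : Option String :=
  let r := supported_versions.foldl (pvStep requested_version) (none, none)
  match r.1 with
  | some b => some b
  | none => r.2

-- ===== PRECONDITION & SPEC =====
def Spec_resolve_fallback_version_py (requested_version : String) (supported_versions : List String) (out : Option String) : Prop := out = resolve_fallback_version_py_alt requested_version supported_versions
instance (requested_version : String) (supported_versions : List String) (out : Option String) : Decidable (Spec_resolve_fallback_version_py requested_version supported_versions out) := by unfold Spec_resolve_fallback_version_py; infer_instance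

-- ===== CLAIM (what is proved, stated in full; the proofs are below) =====
def Claim_equal_resolve_fallback_version_py : Prop := ∀ (requested_version : String) (supported_versions : List String), Dom_resolve_fallback_version_py requested_version supported_versions → Spec_resolve_fallback_version_py requested_version supported_versions (resolve_fallback_version_py requested_version supported_versions)

-- ===== LEMMAS AND PROOFS =====

def pvOptMax (o : Option String) (v : String) : Option String :=
  match o with
  | none => some v
  | some b => if b < v then some v else some b

def pvOptMin (o : Option String) (v : String) : Option String :=
  match o with
  | none => some v
  | some m => if v < m then some v else some m

theorem pvStep_eq (req : String) (acc : Option String × Option String) (v : String) :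
    pvStep req acc v = (if v ≤ req then pvOptMax acc.1 v else acc.1, pvOptMin acc.2 v) := rfl

theorem pvOptMax_eq_max (b v : String) : pvOptMax (some b) v = some (max b v) := by
  simp only [pvOptMax, max_def]
  rcases lt_trichotomy b v with h | h | h
  · rw [if_pos h, if_pos (le_of_lt h)]
  · subst h; rw [if_neg (lt_irrefl _), if_pos le_rfl]
  · rw [if_neg (not_lt.mpr (le_of_lt h)), if_neg (not_le.mpr h)]

theorem pvOptMin_eq_min (m v : String) : pvOptMin (some m) v = some (min m v) := by
  simp only [pvOptMin, min_def]
  rcases lt_trichotomy m v with h | h | h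
  · rw [if_neg (not_lt.mpr (le_of_lt h)), if_pos (le_of_lt h)]
  · subst h; rw [if_neg (lt_irrefl _), if_pos le_rfl]
  · rw [if_pos h, if_neg (not_le.mpr h)]

theorem pvStep_split (req : String) (xs : List String) (ob om : Option String) :
    xs.foldl (pvStep req) (ob, om) =
      ((xs.filter (fun v => decide (v ≤ req))).foldl pvOptMax ob, xs.foldl pvOptMin om) := by
  induction xs generalizing ob om with
  | nil => rfl
  | cons x t ih =>
    rw [List.foldl_cons, pvStep_eq, ih, List.filter_cons]
    by_cases h : x ≤ req
    · rw [if_pos h, if_pos (decide_eq_true h)]; rfl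
    · rw [if_neg h, if_neg (by simpa using h)]; rfl

theorem foldl_pvOptMax_some (t : List String) (x : String) :
    t.foldl pvOptMax (some x) = some (t.foldl max x) := by
  induction t generalizing x with
  | nil => rfl
  | cons y s ih => rw [List.foldl_cons, pvOptMax_eq_max, ih, List.foldl_cons]

theorem foldl_pvOptMin_some (t : List String) (x : String) :
    t.foldl pvOptMin (some x) = some (t.foldl min x) := by
  induction t generalizing x with
  | nil => rfl
  | cons y s ih => rw [List.foldl_cons, pvOptMin_eq_min, ih, List.foldl_cons]

theorem foldl_pvOptMax_none (l : List String) :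
    l.foldl pvOptMax none = PySem.List.max? l (fun y => y) := by
  cases l with
  | nil => rfl
  | cons x t =>
    rw [List.foldl_cons, PySem.List.max?_id_cons]
    exact foldl_pvOptMax_some t x

theorem foldl_pvOptMin_none (l : List String) :
    l.foldl pvOptMin none = PySem.List.min? l (fun y => y) := by
  cases l with
  | nil => rfl
  | cons x t =>
    rw [List.foldl_cons, PySem.List.min?_id_cons]
    exact foldl_pvOptMin_some t x

-- ===== VERDICT (by name: the statement is the Claim_ definition above) =====
theorem resolve_fallback_version_py_spec : Claim_equal_resolve_fallback_version_py := by
  intro req sup _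
  unfold Spec_resolve_fallback_version_py resolve_fallback_version_py resolve_fallback_version_py_alt
  rw [pvStep_split, foldl_pvOptMax_none, foldl_pvOptMin_none]
  by_cases hf : sup.filter (fun v => decide (v ≤ req)) = []
  · rw [if_neg (fun h => h hf), hf]
    cases sup with
    | nil => rfl
    | cons x t => rw [if_pos (List.cons_ne_nil x t)]; rfl
  · rcases h1 : PySem.List.max? (sup.filter (fun v => decide (v ≤ req))) (fun y => y) with _ | b
    · exact absurd ((PySem.List.max?_eq_none_iff _ _).mp h1) hf
    · rw [if_pos hf, h1]
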